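-- pv_equiv track=rewrite | github.com/wh1xdy/sakerhetssm-wargame-problem | 2026-final/crypto/money_printer/solve.py | invert_rand
-- ===== SOURCE A (Python) =====
-- def invert_rand(a):
--     def invert_shift(x):
--         result = 0
--         for i in range(0, 32, 7):
--             x_bits = (x >> i) & ((1 << 7) - 1)
--             if i >= 7:
--                 prev_bits = (result >> (i-7)) & ((1 << 7) - 1)
--             else:
--                 prev_bits = 0
--             current_bits = x_bits ^ prev_bits
--             result |= (current_bits << i)
--         return result
--     a9 = pow(9, -1, 2**32) * a % 2**32
--     a7 = invert_shift(a9)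
--     a5 = pow(5, -1, 2**32) * a7 % 2**32
--
--     return a5
-- ===== SOURCE B (Python) =====
-- def invert_rand(a):
--     M = 0xffffffff
--     x = pow(9, -1, 2**32) * a % 2**32
--     # invert y = r ^ (r << 7) (mod 2^32) by fixed-point iteration:
--     # after k rounds the low 7k bits of r are correct; five rounds cover the 32 bits.
--     r = x
--     for _ in range(5):
--         r = x ^ ((r << 7) & M)
--     return pow(5, -1, 2**32) * r % 2**32
-- ===== Notes on version B (the rewrite author's own statement) =====
-- stated objective: alternative
-- what changed: invert_shift's chunk-by-chunk reconstruction (rebuilding the result 7 bits at a time from previously recovered chunks) is replaced by a five-round fixed-point iteration r = x ^ ((r << 7) & 0xffffffff) on a whole-word estimate; the modular-inverse multiplications around it are unchanged.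
import Mathlib
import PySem

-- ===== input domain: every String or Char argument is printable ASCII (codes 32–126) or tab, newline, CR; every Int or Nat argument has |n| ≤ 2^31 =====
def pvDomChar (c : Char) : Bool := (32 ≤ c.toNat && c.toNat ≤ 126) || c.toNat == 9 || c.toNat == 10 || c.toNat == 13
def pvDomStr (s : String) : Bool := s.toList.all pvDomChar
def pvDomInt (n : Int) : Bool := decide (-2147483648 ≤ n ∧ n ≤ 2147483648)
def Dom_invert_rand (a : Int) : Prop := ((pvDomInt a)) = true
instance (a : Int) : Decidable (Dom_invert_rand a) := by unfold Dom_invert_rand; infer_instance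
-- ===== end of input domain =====

-- B inverts y = x ^ (x << 7) by a five-round fixed-point iteration on a whole-word estimate instead
-- of A's chunk-by-chunk reconstruction (objective: alternative decomposition, same cost).

-- ===== PORT A =====
-- invert_shift: range(0, 32, 7) = [0,7,14,21,28]; the argument x = a9 is a floor-mod by a
-- positive modulus, hence ≥ 0, so carrying it as a Nat is exact for all of Python's >> << & | ^.
def pvInvertShift (x : Nat) : Nat :=
  [0, 7, 14, 21, 28].foldl (fun result i =>
    let x_bits := (x >>> i) &&& ((1 <<< 7) - 1)
    let prev_bits := if 7 ≤ i then (result >>> (i - 7)) &&& ((1 <<< 7) - 1) else 0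
    let current_bits := x_bits ^^^ prev_bits
    result ||| (current_bits <<< i)) 0

-- pow(9, -1, 2**32) = 954437177 and pow(5, -1, 2**32) = 3435973837 (Python's modular inverses)
def invert_rand (a : Int) : Int :=
  let a9 := PySem.Int.mod (954437177 * a) 4294967296
  let a7 := pvInvertShift a9.toNat
  PySem.Int.mod (3435973837 * (a7 : Int)) 4294967296

-- ===== PORT B =====
-- fixed-point iteration: r = x; five times r = x ^ ((r << 7) & 0xffffffff); x ≥ 0 as above.
def pvInvertShiftIter (x : Nat) : Nat :=
  (List.range 5).foldl (fun r _ => x ^^^ ((r <<< 7) &&& 0xffffffff)) x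

def invert_rand_alt (a : Int) : Int :=
  let x := PySem.Int.mod (954437177 * a) 4294967296
  let r := pvInvertShiftIter x.toNat
  PySem.Int.mod (3435973837 * (r : Int)) 4294967296

-- ===== PRECONDITION & SPEC =====
def Spec_invert_rand (a : Int) (out : Int) : Prop := out = invert_rand_alt a
instance (a : Int) (out : Int) : Decidable (Spec_invert_rand a out) := by unfold Spec_invert_rand; infer_instance

-- ===== CLAIM (what is proved, stated in full; the proofs are below) =====
def Claim_equal_invert_rand : Prop := ∀ (a : Int), Dom_invert_rand a → Spec_invert_rand a (invert_rand a)

-- ===== LEMMAS AND PROOFS =====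

theorem tb_mask32 (a : Nat) (j : Nat) :
    (a &&& 4294967295).testBit j = (a.testBit j && decide (j < 32)) := by
  have h : (4294967295 : Nat) = 2 ^ 32 - 1 := by norm_num
  rw [Nat.testBit_and, h, Nat.testBit_two_pow_sub_one]

theorem tb_mask7 (a : Nat) (j : Nat) :
    (a &&& 127).testBit j = (a.testBit j && decide (j < 7)) := by
  have h : (127 : Nat) = 2 ^ 7 - 1 := by norm_num
  rw [Nat.testBit_and, h, Nat.testBit_two_pow_sub_one]

theorem tb_mod32 (a : Nat) (j : Nat) :
    (a % 4294967296).testBit j = (a.testBit j && decide (j < 32)) := by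
  have h : (4294967296 : Nat) = 2 ^ 32 := by norm_num
  rw [h, Nat.testBit_mod_two_pow, Bool.and_comm]

theorem tb_lit127 (j : Nat) : Nat.testBit 127 j = decide (j < 7) := by
  have h : (127 : Nat) = 2 ^ 7 - 1 := by norm_num
  rw [h, Nat.testBit_two_pow_sub_one]

-- the heart of the equivalence: both inversions of x ^ (x << 7) agree modulo 2^32
set_option maxHeartbeats 4000000 in
theorem pvShift_key (x : Nat) (hx : x < 2 ^ 32) :
    pvInvertShift x % 4294967296 = pvInvertShiftIter x := by
  apply Nat.eq_of_testBit_eq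
  intro j
  by_cases hj : j < 32
  · simp only [pvInvertShift, pvInvertShiftIter, List.foldl, List.range, List.range.loop]
    interval_cases j <;>
      · simp only [tb_mod32, tb_mask32, tb_mask7, Nat.testBit_or, Nat.testBit_xor,
          Nat.testBit_shiftLeft, Nat.testBit_shiftRight, Nat.reduceSub, Nat.reduceAdd,
          Nat.reduceShiftLeft, Nat.reduceLeDiff, Nat.reduceLT, decide_true, decide_false,
          Bool.and_true, Bool.and_false, reduceIte, ge_iff_le, Nat.zero_testBit,
          Nat.shiftRight_zero, Nat.shiftLeft_zero, Nat.zero_or, Bool.xor_false, Bool.false_xor,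
          Bool.or_false, Bool.false_or, Bool.true_and, Bool.false_and]
        try simp [tb_lit127, Bool.xor_comm, Bool.xor_assoc, Bool.xor_left_comm]
  · have h32 : (2 : Nat) ^ 32 ≤ 2 ^ j := Nat.pow_le_pow_right (by norm_num) (by omega)
    have h1 : pvInvertShift x % 4294967296 < 2 ^ 32 := Nat.mod_lt _ (by norm_num)
    have h2 : pvInvertShiftIter x < 2 ^ 32 := by
      simp only [pvInvertShiftIter, List.range, List.range.loop, List.foldl]
      exact Nat.xor_lt_two_pow hx (Nat.lt_of_le_of_lt Nat.and_le_right (by norm_num))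
    rw [Nat.testBit_eq_false_of_lt (Nat.lt_of_lt_of_le h1 h32),
        Nat.testBit_eq_false_of_lt (Nat.lt_of_lt_of_le h2 h32)]

-- ===== VERDICT (by name: the statement is the Claim_ definition above) =====
theorem invert_rand_spec : Claim_equal_invert_rand := by
  unfold Claim_equal_invert_rand
  intro a _
  unfold Spec_invert_rand invert_rand invert_rand_alt
  have hpos : (0 : Int) < 4294967296 := by norm_num
  simp only [PySem.Int.mod_eq_emod_of_pos hpos]
  set m : Int := (954437177 * a) % 4294967296 with hm
  have hge : 0 ≤ m := Int.emod_nonneg _ (by norm_num)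
  have hlt : m < 4294967296 := Int.emod_lt_of_pos _ hpos
  have hn : m.toNat < 2 ^ 32 := by omega
  have hkey : pvInvertShift m.toNat % 4294967296 = pvInvertShiftIter m.toNat % 4294967296 := by
    rw [pvShift_key m.toNat hn]
    exact (Nat.mod_eq_of_lt (by
      have := pvShift_key m.toNat hn
      have h2 : pvInvertShiftIter m.toNat < 4294967296 := by
        rw [← this]; exact Nat.mod_lt _ (by norm_num)
      exact h2)).symm
  have hmodeq : ((pvInvertShift m.toNat : Int)) % 4294967296
      = ((pvInvertShiftIter m.toNat : Int)) % 4294967296 := by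
    exact_mod_cast congrArg (fun n : Nat => (n : Int)) hkey
  calc (3435973837 * (pvInvertShift m.toNat : Int)) % 4294967296
      = (3435973837 % 4294967296 * ((pvInvertShift m.toNat : Int) % 4294967296)) % 4294967296 := by
        rw [← Int.mul_emod]
    _ = (3435973837 % 4294967296 * ((pvInvertShiftIter m.toNat : Int) % 4294967296)) % 4294967296 := by
        rw [hmodeq]
    _ = (3435973837 * (pvInvertShiftIter m.toNat : Int)) % 4294967296 := by
        rw [← Int.mul_emod]
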